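-- pv_equiv track=rewrite | github.com/dolekapil/Algorithms | partitions.py | evenSumPartition
-- ===== SOURCE A (Python) =====
-- import math
--
-- def evenSumPartition(n, nums):
--     """
--     This method takes the input list as input and gives the possible ways
--     to divide the subsequence into consequative subsequences such that each
--     subsequence sum is even. This method uses greedy approach and runs in
--     O(N) time complexity.
--     :param n: Total number of input elements.
--     :param nums: input sequence.
--     :return: Possible ways of dividing subsequence, each having even sum.
--     """
--     counter = 0
--     index = 0
--     checkEven = True
--     while index < n:
--         # If number at given index is odd.
--         if nums[index] % 2 == 1:
--             # Check if given sum is even, if it is then change the flag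
--             # to false, otherwise set flag to true and increment the
--             # counter by 1.
--             if checkEven:
--                 checkEven = False
--             else:
--                 checkEven = True
--                 counter += 1
--         else:
--             # if the number at given index it even and flag is true, then
--             # increment the counter by 1.
--             if checkEven:
--                 counter += 1
--         index += 1
--     # return 2^counter - 1 as total possible ways if counter > 0, else 0.
--     return (0, int(math.pow(2, counter-1)))[counter > 0]
-- ===== SOURCE B (Python) =====
-- def evenSumPartition(n, nums):
--     # Gap-counting: collect the positions of the odd elements; the even-sum
--     # prefixes are exactly the gap before the 1st odd position plus the gaps
--     # between the 2nd and 3rd, 4th and 5th, ... odd positions (sentinel n).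
--     odds = [i for i in range(n) if nums[i] % 2 == 1]
--     odds.append(n)
--     count = odds[0]
--     for j in range(1, len(odds) - 1, 2):
--         count += odds[j + 1] - odds[j]
--     return 2 ** (count - 1) if count > 0 else 0
-- ===== Notes on version B (the rewrite author's own statement) =====
-- stated objective: alternative
-- what changed: B locates the positions of the odd elements and sums the gap before the first odd position plus the gaps between the 2nd-3rd, 4th-5th, ... odd positions (with sentinel n) instead of A's greedy parity-flag scan, and returns 2**(count-1) by integer exponentiation instead of int(math.pow(...)).
import Mathlib
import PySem

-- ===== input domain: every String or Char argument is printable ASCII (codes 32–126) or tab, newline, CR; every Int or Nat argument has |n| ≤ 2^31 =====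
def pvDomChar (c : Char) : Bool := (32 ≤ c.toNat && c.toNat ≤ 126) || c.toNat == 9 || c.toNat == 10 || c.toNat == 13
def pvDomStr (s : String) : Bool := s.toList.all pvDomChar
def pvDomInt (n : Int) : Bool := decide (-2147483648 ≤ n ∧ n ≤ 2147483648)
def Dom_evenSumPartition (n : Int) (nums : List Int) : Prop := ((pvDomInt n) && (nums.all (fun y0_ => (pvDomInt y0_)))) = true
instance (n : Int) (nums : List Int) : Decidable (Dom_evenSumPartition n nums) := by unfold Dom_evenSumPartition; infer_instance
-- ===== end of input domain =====

-- B computes the even-prefix count from the positions of the odd elements (gap sums)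
-- instead of A's greedy parity-flag scan, and uses integer exponentiation.

-- ===== PORT A =====
-- while index < n loop; fuel n.toNat is exactly the number of iterations.
def evenSumPartitionLoop (n : Int) (nums : List Int) (index counter : Int)
    (checkEven : Bool) : Nat → Int
  | 0 => counter
  | fuel + 1 =>
    if index < n then
      if PySem.Int.mod (PySem.List.pyGetD nums index 0) 2 == 1 then
        if checkEven then
          evenSumPartitionLoop n nums (index + 1) counter false fuel
        else
          evenSumPartitionLoop n nums (index + 1) (counter + 1) true fuel
      else
        if checkEven then
          evenSumPartitionLoop n nums (index + 1) (counter + 1) checkEven fuel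
        else
          evenSumPartitionLoop n nums (index + 1) counter checkEven fuel
    else counter

def evenSumPartition (n : Int) (nums : List Int) : Int :=
  let counter := evenSumPartitionLoop n nums 0 0 true n.toNat
  -- (0, int(math.pow(2, counter-1)))[counter > 0]; exact under Pre_ (counter ≤ 1024,
  -- math.pow(2, k) is an exact float for 0 ≤ k ≤ 1023 and raises OverflowError above)
  if counter > 0 then 2 ^ (counter - 1).toNat else 0

-- ===== PORT B =====
def evenSumPartition_alt (n : Int) (nums : List Int) : Int :=
  -- odds = [i for i in range(n) if nums[i] % 2 == 1]; odds.append(n)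
  let odds := ((PySem.List.pyRange 0 n 1).filter
      (fun i => PySem.Int.mod (PySem.List.pyGetD nums i 0) 2 == 1)) ++ [n]
  -- count = odds[0]; for j in range(1, len(odds) - 1, 2): count += odds[j+1] - odds[j]
  let count := (PySem.List.pyRange 1 ((odds.length : Int) - 1) 2).foldl
      (fun c j => c + (PySem.List.pyGetD odds (j + 1) 0 - PySem.List.pyGetD odds j 0))
      (PySem.List.pyGetD odds 0 0)
  if count > 0 then 2 ^ (count - 1).toNat else 0

-- ===== PRECONDITION & SPEC =====
-- number of even prefix sums of nums[0:n] (a property of the input, used only by Pre_/Raises_)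
def pvEvenPrefixCount (n : Int) (nums : List Int) : Int :=
  ((((nums.take n.toNat).scanl (· + ·) 0).tail).countP (fun s => s % 2 == 0) : Nat)

-- Pre_ excludes exactly the inputs where Python A raises: n > len(nums) (IndexError) and
-- inputs with more than 1024 even prefix sums, where math.pow(2, counter-1) overflows the
-- float range and A raises OverflowError (below that bound int(math.pow(2, k)) is exact).
def Pre_evenSumPartition (n : Int) (nums : List Int) : Prop :=
  n ≤ nums.length ∧ pvEvenPrefixCount n nums ≤ 1024
instance (n : Int) (nums : List Int) : Decidable (Pre_evenSumPartition n nums) := by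
  unfold Pre_evenSumPartition; infer_instance

def pvWitness_evenSumPartition : Int × List Int := (3, [1, 3, 2])

def Spec_evenSumPartition (n : Int) (nums : List Int) (out : Int) : Prop := out = evenSumPartition_alt n nums
instance (n : Int) (nums : List Int) (out : Int) : Decidable (Spec_evenSumPartition n nums out) := by unfold Spec_evenSumPartition; infer_instance

-- ===== CLAIM (what is proved, stated in full; the proofs are below) =====
def Claim_equal_evenSumPartition : Prop := ∀ (n : Int) (nums : List Int), Dom_evenSumPartition n nums → Pre_evenSumPartition n nums → Spec_evenSumPartition n nums (evenSumPartition n nums)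

-- ===== LEMMAS AND PROOFS =====

-- A's loop, as pure recursion on the remaining elements.
def goA : List Int → Int → Bool → Int
  | [], c, _ => c
  | x :: rest, c, b =>
    if PySem.Int.mod x 2 == 1 then
      if b then goA rest c false else goA rest (c + 1) true
    else
      if b then goA rest (c + 1) b else goA rest c b

-- B's pairwise gap sum: (l[1]-l[0]) + (l[3]-l[2]) + …
def pairSum : List Int → Int
  | [] => 0
  | [_] => 0
  | x :: y :: r => (y - x) + pairSum r

-- positions (from offset k) of the odd elements
def oddPos : List Int → Int → List Int
  | [], _ => []
  | x :: r, k => if PySem.Int.mod x 2 == 1 then k :: oddPos r (k + 1) else oddPos r (k + 1)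

lemma goA_add (t : List Int) : ∀ (c : Int) (b : Bool), goA t c b = c + goA t 0 b := by
  induction t with
  | nil => intro c b; simp [goA]
  | cons x r ih =>
    intro c b
    by_cases hx : PySem.Int.mod x 2 == 1 <;> cases b <;>
      simp only [goA, hx, if_true, if_false, Bool.false_eq_true] <;>
      ((try rw [ih (0 + 1)]); (try rw [ih (c + 1)]); (try rw [ih c]); try ring)

lemma loopA_eq_goA (t : List Int) : ∀ (pre post : List Int) (c : Int) (b : Bool),
    evenSumPartitionLoop ((pre.length : Int) + t.length) (pre ++ (t ++ post))
      (pre.length) c b t.length = goA t c b := by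
  induction t with
  | nil => intro pre post c b; simp [evenSumPartitionLoop, goA]
  | cons x rest ih =>
    intro pre post c b
    have hget : PySem.List.pyGetD (pre ++ ((x :: rest) ++ post)) (pre.length : Int) 0 = x := by
      simp [PySem.List.pyGetD_natCast, List.getD_eq_getElem?_getD]
    have hidx : ((pre.length : Int)) < (pre.length : Int) + ((x :: rest).length : Int) := by
      simp only [List.length_cons]; push_cast; omega
    have hrec : ∀ (c' : Int) (b' : Bool),
        evenSumPartitionLoop ((pre.length : Int) + ((x :: rest).length : Int))
          (pre ++ ((x :: rest) ++ post)) ((pre.length : Int) + 1) c' b' rest.length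
        = goA rest c' b' := by
      intro c' b'
      have h := ih (pre ++ [x]) post c' b'
      simp only [List.append_assoc, List.cons_append, List.nil_append,
        List.length_append, List.length_cons, List.length_nil,
        Nat.cast_add, Nat.cast_one] at h
      simp only [List.cons_append, List.length_cons]
      push_cast
      have e : (pre.length : Int) + ((rest.length : Int) + 1)
          = (pre.length : Int) + 1 + (rest.length : Int) := by ring
      rw [e]
      exact h
    show evenSumPartitionLoop _ _ _ c b (rest.length + 1) = _
    rw [evenSumPartitionLoop, if_pos hidx, hget, goA]
    by_cases hm : PySem.Int.mod x 2 == 1 <;> by_cases hb : b <;>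
      simp only [hm, hb, if_true, if_false, Bool.false_eq_true, hrec]

-- step-2 range induction forms (derived from PySem.List.pyRange_of_pos)
lemma pyRange2_nil {a b : Int} (h : b ≤ a) : PySem.List.pyRange a b 2 = [] := by
  rw [PySem.List.pyRange_of_pos a b (by omega)]
  rw [if_neg (by omega)]
  simp

lemma pyRange2_cons {a b : Int} (h : a < b) :
    PySem.List.pyRange a b 2 = a :: PySem.List.pyRange (a + 2) b 2 := by
  rw [PySem.List.pyRange_of_pos a b (by omega), PySem.List.pyRange_of_pos (a+2) b (by omega)]
  rw [if_pos h]
  by_cases h2 : a + 2 < b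
  · rw [if_pos h2]
    have hm : ((b - a + 2 - 1) / 2).toNat = ((b - (a+2) + 2 - 1) / 2).toNat + 1 := by omega
    rw [hm, List.range_succ_eq_map]
    simp only [List.map_cons, List.map_map]
    congr 1
    · push_cast; ring
    · apply List.map_congr_left; intro k hk
      simp only [Function.comp_apply]; push_cast; ring
  · rw [if_neg h2]
    have hm : ((b - a + 2 - 1) / 2).toNat = 1 := by omega
    rw [hm]
    simp

-- the indexed step-2 gap fold is pairSum
lemma fold_pairSum (l : List Int) : ∀ (pre : List Int) (c : Int),
    (PySem.List.pyRange (pre.length : Int) (((pre ++ l).length : Int) - 1) 2).foldl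
      (fun c j => c + (PySem.List.pyGetD (pre ++ l) (j + 1) 0
                        - PySem.List.pyGetD (pre ++ l) j 0)) c
    = c + pairSum l := by
  induction l using pairSum.induct with
  | case1 =>
    intro pre c
    rw [pyRange2_nil (by simp only [List.append_nil]; omega)]
    have h0 : pairSum [] = 0 := rfl
    simp only [List.foldl_nil, h0, add_zero]
  | case2 x =>
    intro pre c
    rw [pyRange2_nil (by simp only [List.length_append, List.length_cons, List.length_nil]; push_cast; omega)]
    have h0 : pairSum [x] = 0 := rfl
    simp only [List.foldl_nil, h0, add_zero]
  | case3 x y r ih =>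
    intro pre c
    rw [pyRange2_cons (by simp only [List.length_append, List.length_cons]; push_cast; omega)]
    simp only [List.foldl_cons]
    have hx : PySem.List.pyGetD (pre ++ (x :: y :: r)) ((pre.length : Int)) 0 = x := by
      simp [PySem.List.pyGetD_natCast, List.getD_eq_getElem?_getD]
    have hy : PySem.List.pyGetD (pre ++ (x :: y :: r)) ((pre.length : Int) + 1) 0 = y := by
      have e : (pre.length : Int) + 1 = ((pre.length + 1 : Nat) : Int) := by push_cast; ring
      rw [e, PySem.List.pyGetD_natCast]
      simp [List.getD_eq_getElem?_getD]
    rw [hx, hy]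
    have h := ih (pre ++ [x, y]) (c + (y - x))
    have e1 : (pre ++ [x, y]) ++ r = pre ++ (x :: y :: r) := by simp
    have e2 : (((pre ++ [x, y]).length : Nat) : Int) = (pre.length : Int) + 2 := by
      simp
    rw [e1, e2] at h
    rw [h]
    simp [pairSum]
    ring

-- the comprehension over range(n) is oddPos
lemma filter_oddPos (t : List Int) : ∀ (pre post : List Int),
    (PySem.List.pyRange (pre.length : Int) ((pre.length : Int) + (t.length : Int)) 1).filter
      (fun i => PySem.Int.mod (PySem.List.pyGetD (pre ++ (t ++ post)) i 0) 2 == 1)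
    = oddPos t (pre.length : Int) := by
  induction t with
  | nil =>
    intro pre post
    rw [PySem.List.pyRange_one_eq_nil (by simp)]
    simp [oddPos]
  | cons x r ih =>
    intro pre post
    rw [PySem.List.pyRange_one_cons (by simp only [List.length_cons]; push_cast; omega)]
    simp only [List.filter_cons]
    have hget : PySem.List.pyGetD (pre ++ ((x :: r) ++ post)) (pre.length : Int) 0 = x := by
      simp [PySem.List.pyGetD_natCast, List.getD_eq_getElem?_getD]
    have hrec : (PySem.List.pyRange ((pre.length : Int) + 1)
          ((pre.length : Int) + ((x :: r).length : Int)) 1).filter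
        (fun i => PySem.Int.mod (PySem.List.pyGetD (pre ++ ((x :: r) ++ post)) i 0) 2 == 1)
        = oddPos r ((pre.length : Int) + 1) := by
      have h := ih (pre ++ [x]) post
      simp only [List.append_assoc, List.cons_append, List.nil_append,
        List.length_append, List.length_cons, List.length_nil,
        Nat.cast_add, Nat.cast_one] at h
      simp only [List.cons_append, List.length_cons]
      push_cast
      have e : (pre.length : Int) + ((r.length : Int) + 1)
          = (pre.length : Int) + 1 + (r.length : Int) := by ring
      rw [e]
      exact h
    rw [hget, hrec]
    simp [oddPos]

-- gap sums over the odd positions compute A's counter (true part: even running sum,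
-- false part: odd running sum)
lemma key_gaps (t : List Int) : ∀ (off : Int),
    (((oddPos t off ++ [off + (t.length : Int)]).headD 0 - off)
        + pairSum (oddPos t off ++ [off + (t.length : Int)]).tail = goA t 0 true)
    ∧ (pairSum (oddPos t off ++ [off + (t.length : Int)]) = goA t 0 false) := by
  induction t with
  | nil => intro off; simp [oddPos, pairSum, goA]
  | cons x r ih =>
    intro off
    obtain ⟨ih1, ih2⟩ := ih (off + 1)
    have hsent : off + (((x :: r).length : Nat) : Int) = (off + 1) + (r.length : Int) := by
      simp; ring
    rw [hsent]
    by_cases hx : PySem.Int.mod x 2 == 1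
    · constructor
      · simp only [oddPos, hx, if_true, List.cons_append, List.headD_cons, List.tail_cons,
          goA]
        omega
      · simp only [oddPos, hx, if_true, List.cons_append, goA, Bool.false_eq_true, if_false]
        rw [goA_add r (0 + 1) true]
        cases hq : oddPos r (off + 1) with
        | nil =>
          rw [hq] at ih1
          simp only [List.nil_append, List.headD_cons, List.tail_cons, pairSum] at ih1 ⊢
          omega
        | cons q qr =>
          rw [hq] at ih1
          simp only [List.cons_append, List.headD_cons, List.tail_cons, pairSum] at ih1 ⊢
          omega
    · constructor
      · simp only [oddPos, hx, if_false, Bool.false_eq_true, goA, if_true]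
        rw [goA_add r (0 + 1) true]
        omega
      · simp only [oddPos, hx, if_false, Bool.false_eq_true, goA]
        exact ih2

-- ===== VERDICT (by name: the statement is the Claim_ definition above) =====
theorem evenSumPartition_spec : Claim_equal_evenSumPartition := by
  intro n nums _ hpre
  unfold Spec_evenSumPartition
  show evenSumPartition n nums = evenSumPartition_alt n nums
  obtain ⟨h1, -⟩ := hpre
  by_cases hn : n ≤ 0
  · have hA : evenSumPartition n nums = 0 := by
      simp [evenSumPartition, Int.toNat_of_nonpos hn, evenSumPartitionLoop]
    have hB : evenSumPartition_alt n nums = 0 := by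
      rw [evenSumPartition_alt, PySem.List.pyRange_one_eq_nil hn]
      simp only [List.filter_nil, List.nil_append, List.length_cons, List.length_nil]
      rw [pyRange2_nil (by omega)]
      simp only [List.foldl_nil, PySem.List.pyGetD_zero_cons]
      rw [if_neg (by omega)]
    rw [hA, hB]
  · push Not at hn
    set t := nums.take n.toNat with ht
    have hlen : (t.length : Int) = n := by
      simp [ht, List.length_take]
      omega
    have hnums : nums = t ++ nums.drop n.toNat := by simp [ht]
    -- A side: the loop computes goA t 0 true
    have hA : evenSumPartitionLoop n nums 0 0 true n.toNat = goA t 0 true := by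
      have hfuel : n.toNat = t.length := by omega
      have h := loopA_eq_goA t [] (nums.drop n.toNat) 0 true
      simp only [List.length_nil, Nat.cast_zero, zero_add, List.nil_append] at h
      calc evenSumPartitionLoop n nums 0 0 true n.toNat
          = evenSumPartitionLoop (↑t.length) (t ++ nums.drop n.toNat) 0 0 true t.length := by
            rw [hlen, ← hnums, hfuel]
        _ = goA t 0 true := h
    -- B side: the comprehension is oddPos t 0
    have hfilter : (PySem.List.pyRange 0 n 1).filter
        (fun i => PySem.Int.mod (PySem.List.pyGetD nums i 0) 2 == 1) = oddPos t 0 := by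
      have h := filter_oddPos t [] (nums.drop n.toNat)
      simp only [List.length_nil, Nat.cast_zero, zero_add, List.nil_append] at h
      rw [hlen] at h
      rw [hnums]
      exact h
    -- B side: the gap fold computes goA t 0 true as well
    obtain ⟨a, rest, hq⟩ : ∃ a rest, oddPos t 0 ++ [n] = a :: rest :=
      List.exists_cons_of_ne_nil (by simp)
    have hcount : (PySem.List.pyRange 1 (((a :: rest).length : Int) - 1) 2).foldl
        (fun c j => c + (PySem.List.pyGetD (a :: rest) (j + 1) 0
                          - PySem.List.pyGetD (a :: rest) j 0))
        (PySem.List.pyGetD (a :: rest) 0 0) = a + pairSum rest := by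
      have h := fold_pairSum rest [a] a
      simp only [List.cons_append, List.nil_append, List.length_cons, List.length_nil,
        Nat.cast_add, Nat.cast_one, zero_add] at h ⊢
      rw [PySem.List.pyGetD_zero_cons]
      exact h
    have hgap : a + pairSum rest = goA t 0 true := by
      have h := (key_gaps t 0).1
      rw [zero_add, hlen, hq] at h
      simpa using h
    rw [evenSumPartition, evenSumPartition_alt, hfilter, hq, hcount, hgap, hA]
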